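-- pv_equiv track=rewrite | github.com/mcooley/PiSlideshow | PhotoMetadataStore.py | parseMonthFromPath
-- ===== SOURCE A (Python) =====
-- def parseMonthFromPath(path):
--     parts = path.split("/")
--     year = None
--     month = -1
--     MONTHS = dict(zip(['january', 'february', 'march', 'april', 'may', 'june', 'july', 'august', 'september', 'october', 'november', 'december'], range(12)))
--     for part in parts:
--         try:
--             if not year:
--                 year = int(part)
--             elif month == -1 and part in MONTHS:
--                 month = MONTHS[part]
--         except:
--             pass
--     if not year:
--         return None
--     return ((year - 1970) * 12) + month;
-- ===== SOURCE B (Python) =====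
-- MONTH_INDEX = {m: i for i, m in enumerate(
--     ['january', 'february', 'march', 'april', 'may', 'june',
--      'july', 'august', 'september', 'october', 'november', 'december'])}
--
-- def parseMonthFromPath(path):
--     parts = path.split("/")
--     # first pass: first part that int-parses to a nonzero value is the year
--     year_idx = None
--     for i, part in enumerate(parts):
--         try:
--             if int(part) != 0:
--                 year_idx = i
--                 break
--         except ValueError:
--             continue
--     if year_idx is None:
--         return None
--     year = int(parts[year_idx])
--     # second pass: first month name strictly after the year part
--     month = -1
--     for part in parts[year_idx + 1:]:
--         if part in MONTH_INDEX:
--             month = MONTH_INDEX[part]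
--             break
--     return ((year - 1970) * 12) + month
-- ===== Notes on version B (the rewrite author's own statement) =====
-- stated objective: alternative
-- what changed: Replaces A's single interleaved state-machine loop (Optional year, month sentinel, bare try/except around both branches) with two separate scans: one that finds the first nonzero-int part, and one that takes the first month name after it.
import Mathlib
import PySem

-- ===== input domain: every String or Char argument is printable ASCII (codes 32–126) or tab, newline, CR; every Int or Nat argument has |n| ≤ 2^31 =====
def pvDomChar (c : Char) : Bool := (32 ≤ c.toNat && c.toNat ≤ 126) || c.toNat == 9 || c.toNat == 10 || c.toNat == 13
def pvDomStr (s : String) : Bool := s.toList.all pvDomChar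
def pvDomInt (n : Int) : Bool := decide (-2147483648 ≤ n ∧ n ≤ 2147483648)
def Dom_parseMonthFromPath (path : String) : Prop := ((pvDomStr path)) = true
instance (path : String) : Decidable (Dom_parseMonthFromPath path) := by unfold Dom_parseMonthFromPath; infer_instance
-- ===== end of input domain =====

-- B changes the decomposition: A's one interleaved state-machine loop becomes two separate scans
-- (find the first nonzero-int part, then the first month name after it); same cost, no speed claim.

-- ===== PORT A =====
-- MONTHS = dict(zip([...], range(12)))
def pvMonthsA : PySem.Dict String Int :=
  PySem.Dict.mk [("january", 0), ("february", 1), ("march", 2), ("april", 3),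
    ("may", 4), ("june", 5), ("july", 6), ("august", 7),
    ("september", 8), ("october", 9), ("november", 10), ("december", 11)]

-- the for-loop over parts with state (year, month); 'not year' = year is None or 0;
-- int(part) failing (bare except) leaves the state unchanged
def pvLoopA : List String → Option Int → Int → Option Int × Int
  | [], year, month => (year, month)
  | part :: rest, year, month =>
    if year = none ∨ year = some 0 then
      match PySem.Int.ofStr? part with
      | some v => pvLoopA rest (some v) month
      | none => pvLoopA rest year month
    else if month = -1 ∧ (pvMonthsA.contains part) = true then
      pvLoopA rest year (pvMonthsA.getD part 0)
    else
      pvLoopA rest year month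

-- s.split("/"): sep is the non-empty literal "/", so split? always returns some
def pvSplitSlash (s : String) : List String := (PySem.Str.split? s "/").getD []

def parseMonthFromPath (path : String) : Option Int :=
  let parts := pvSplitSlash path
  let (year, month) := pvLoopA parts none (-1)
  match year with
  | none => none
  | some y => if y = 0 then none else some ((y - 1970) * 12 + month)

-- ===== PORT B =====
def pvMonthIndexB : PySem.Dict String Int := pvMonthsA

-- first pass: first part that int-parses to a nonzero value; returns it and the parts after it
def pvFindYearB : List String → Option (Int × List String)
  | [] => none
  | part :: rest =>
    match PySem.Int.ofStr? part with
    | some v => if v ≠ 0 then some (v, rest) else pvFindYearB rest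
    | none => pvFindYearB rest

-- second pass: first month name among the remaining parts, else -1
def pvFindMonthB : List String → Int
  | [] => -1
  | part :: rest =>
    match pvMonthIndexB.get? part with
    | some m => m
    | none => pvFindMonthB rest

def parseMonthFromPath_alt (path : String) : Option Int :=
  match pvFindYearB (pvSplitSlash path) with
  | none => none
  | some (year, rest) => some ((year - 1970) * 12 + pvFindMonthB rest)

-- ===== PRECONDITION & SPEC =====
def Spec_parseMonthFromPath (path : String) (out : Option Int) : Prop := out = parseMonthFromPath_alt path
instance (path : String) (out : Option Int) : Decidable (Spec_parseMonthFromPath path out) := by unfold Spec_parseMonthFromPath; infer_instance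

-- ===== CLAIM (what is proved, stated in full; the proofs are below) =====
def Claim_equal_parseMonthFromPath : Prop := ∀ (path : String), Dom_parseMonthFromPath path → Spec_parseMonthFromPath path (parseMonthFromPath path)

-- ===== LEMMAS AND PROOFS =====

-- every month value is ≠ -1
theorem pvMonths_get?_ne (p : String) (m : Int) (h : pvMonthsA.get? p = some m) : m ≠ -1 := by
  simp [pvMonthsA, PySem.Dict.get?] at h
  obtain ⟨a, h⟩ := h
  repeat' rcases h with ⟨-, -, rfl⟩ | ⟨-, h⟩
  all_goals omega

-- once month is set (≠ -1) the month branch never fires again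
theorem pvLoopA_month_fixed (parts : List String) (y : Int) (m : Int)
    (hy : y ≠ 0) (hm : m ≠ -1) : pvLoopA parts (some y) m = (some y, m) := by
  induction parts with
  | nil => rfl
  | cons p rest ih =>
    simp only [pvLoopA]
    rw [if_neg (by simp [hy])]
    rw [if_neg (by simp [hm])]
    exact ih

-- with the year found (nonzero) and month still -1, the loop computes pvFindMonthB
theorem pvLoopA_month (parts : List String) (y : Int) (hy : y ≠ 0) :
    pvLoopA parts (some y) (-1) = (some y, pvFindMonthB parts) := by
  induction parts with
  | nil => rfl
  | cons p rest ih =>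
    simp only [pvLoopA, pvFindMonthB]
    rw [if_neg (by simp [hy])]
    rcases hg : pvMonthIndexB.get? p with _ | m
    · have hc : pvMonthsA.contains p = false := by
        simpa [pvMonthIndexB, PySem.Dict.contains_eq_isSome_get?, hg] using
          congrArg Option.isSome hg
      rw [if_neg (by simp [hc])]
      simpa [hg] using ih
    · have hc : pvMonthsA.contains p = true := by
        simpa [pvMonthIndexB, PySem.Dict.contains_eq_isSome_get?] using
          congrArg Option.isSome hg
      have hg' : pvMonthsA.get? p = some m := by simpa [pvMonthIndexB] using hg
      have hd : pvMonthsA.getD p 0 = m := by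
        simp [PySem.Dict.getD_eq_get?_getD, hg']
      rw [if_pos (by simp [hc])]
      rw [hd, pvLoopA_month_fixed rest y m hy (pvMonths_get?_ne p m hg')]

-- the phase-1 loop (year still falsy) agrees with the two-pass decomposition
theorem pvLoopA_phase1 (parts : List String) (y0 : Option Int)
    (h0 : y0 = none ∨ y0 = some 0) :
    (match (pvLoopA parts y0 (-1)).1 with
      | none => none
      | some y => if y = 0 then none else some ((y - 1970) * 12 + (pvLoopA parts y0 (-1)).2))
    = (match pvFindYearB parts with
      | none => (none : Option Int)
      | some (year, rest) => some ((year - 1970) * 12 + pvFindMonthB rest)) := by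
  induction parts generalizing y0 with
  | nil =>
    rcases h0 with h | h <;> simp [pvLoopA, pvFindYearB, h]
  | cons p rest ih =>
    simp only [pvLoopA, pvFindYearB]
    rw [if_pos h0]
    rcases hp : PySem.Int.ofStr? p with _ | v
    · exact ih y0 h0
    · simp only
      by_cases hv : v = 0
      · subst hv
        simpa using ih (some 0) (Or.inr rfl)
      · rw [pvLoopA_month rest v hv]
        simp [hv]

-- ===== VERDICT (by name: the statement is the Claim_ definition above) =====
theorem parseMonthFromPath_spec : Claim_equal_parseMonthFromPath := by
  intro path _
  unfold Spec_parseMonthFromPath parseMonthFromPath parseMonthFromPath_alt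
  simpa using pvLoopA_phase1 (pvSplitSlash path) none (Or.inl rfl)
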